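-- pv_equiv track=rewrite | github.com/Lobster-lamer/module9 | module_9_6.py | all_variants
-- ===== SOURCE A (Python) =====
-- def all_variants(text: str):
--     _substring = ""
--     index = 0
--     delta = 1
--     while _substring != text:
--         index += 1
--         _substring = text[index - delta: index]
--         if index == len(text):
--             delta += 1
--             index = delta - 1
--         yield _substring
-- ===== SOURCE B (Python) =====
-- def all_variants(text: str):
--     # Incremental window growth: start from the 1-char windows and build each
--     # next round by appending the following character of the text to every
--     # surviving window -- no slicing, no index/length arithmetic.
--     windows = list(text)
--     while windows:
--         yield from windows
--         windows = [w + c for w, c in zip(windows, text[len(windows[0]):])]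
-- ===== Notes on version B (the rewrite author's own statement) =====
-- stated objective: alternative
-- what changed: Instead of re-slicing the text for every position as A's while-loop with manual index/delta counters does, B maintains the list of current-length windows and derives each next round by zipping the windows with the remaining characters and appending one character to each, so substrings are grown incrementally rather than cut out by index arithmetic.
import Mathlib
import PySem

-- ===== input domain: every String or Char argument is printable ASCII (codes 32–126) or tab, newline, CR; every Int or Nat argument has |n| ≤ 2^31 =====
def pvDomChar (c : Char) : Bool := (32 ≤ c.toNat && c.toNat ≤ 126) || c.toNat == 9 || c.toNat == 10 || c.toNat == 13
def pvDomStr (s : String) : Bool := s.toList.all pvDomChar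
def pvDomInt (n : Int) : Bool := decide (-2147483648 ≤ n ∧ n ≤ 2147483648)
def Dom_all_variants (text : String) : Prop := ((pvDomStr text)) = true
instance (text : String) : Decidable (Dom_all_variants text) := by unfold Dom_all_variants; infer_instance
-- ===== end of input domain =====

-- B replaces A's slice-per-position while-loop (manual index/delta counters, termination by
-- string equality) by incremental window growth: each round appends one character to every
-- surviving window (objective: alternative).

-- ===== PORT A =====
-- A's while-loop as recursion on its state (_substring, index, delta); the fuel argument is
-- only a totality guard (the proofs below show it is never exhausted), each iteration uses one unit.
def allVariantsLoop (text : String) : Nat → String → Int → Int → List String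
  | 0, _, _, _ => []
  | f + 1, sub, index, delta =>
    if sub = text then []
    else
      let index' := index + 1
      let sub' := PySem.Str.slice text (some (index' - delta)) (some index')
      if index' = PySem.Str.len text then
        sub' :: allVariantsLoop text f sub' ((delta + 1) - 1) (delta + 1)
      else
        sub' :: allVariantsLoop text f sub' index' delta

def all_variants (text : String) : List String :=
  allVariantsLoop text ((PySem.Str.len text).toNat * ((PySem.Str.len text).toNat + 3) + 1) "" 0 1

-- ===== PORT B =====
-- B's while-loop over `windows`; the fuel argument is only a totality guard (one round per
-- unit; the proofs below show it is never exhausted).  `w + c` over `zip(windows, text[len(windows[0]):])`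
-- becomes `String.push` over the zip with the slice's characters.
def altRounds (text : String) : Nat → List String → List String
  | 0, _ => []
  | f + 1, windows =>
    match windows with
    | [] => []
    | w :: ws =>
      (w :: ws) ++ altRounds text f
        (((w :: ws).zip (PySem.Str.slice text (some (PySem.Str.len w)) none).toList).map
          (fun p => p.1.push p.2))

def all_variants_alt (text : String) : List String :=
  altRounds text (text.toList.length + 1) (text.toList.map (fun c => String.singleton c))

-- ===== PRECONDITION & SPEC =====
def Spec_all_variants (text : String) (out : List String) : Prop := out = all_variants_alt text
instance (text : String) (out : List String) : Decidable (Spec_all_variants text out) := by unfold Spec_all_variants; infer_instance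

-- ===== CLAIM (what is proved, stated in full; the proofs are below) =====
def Claim_equal_all_variants : Prop := ∀ (text : String), Dom_all_variants text → Spec_all_variants text (all_variants text)

-- ===== LEMMAS AND PROOFS =====

-- the slice text[s : s+L], for natural s, L
def pvSl (text : String) (s L : Nat) : String :=
  PySem.Str.slice text (some (s : Int)) (some ((s : Int) + (L : Int)))

-- all length-L slices starting at positions st, st+1, …, n-L
def pvRow (text : String) (st L : Nat) : List String :=
  (List.range' st (text.toList.length + 1 - L - st)).map (fun s => pvSl text s L)

-- all slices of lengths L, L+1, …, n (each full row)
def pvRows (text : String) (L : Nat) : List String :=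
  (List.range' L (text.toList.length + 1 - L)).flatMap (fun k => pvRow text 0 k)

lemma pvSl_toList (text : String) (s L : Nat) :
    (pvSl text s L).toList = (text.toList.drop s).take L := by
  simp [pvSl, PySem.Str.toList_slice, PySem.Chars.slice_eq_listSlice,
    PySem.List.slice_natCast_add]

lemma pvSl_length (text : String) (s L : Nat) (h : s + L ≤ text.toList.length) :
    (pvSl text s L).toList.length = L := by
  simp only [pvSl_toList, List.length_take, List.length_drop]; omega

lemma pvSl_full (text : String) : pvSl text 0 text.toList.length = text := by
  apply String.toList_inj.mp
  simp [pvSl_toList]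

lemma loop_text (text : String) (f : Nat) (i d : Int) :
    allVariantsLoop text f text i d = [] := by
  cases f <;> simp [allVariantsLoop]

lemma loop_eq (text : String) (f : Nat) :
    ∀ (L st : Nat) (sub : String),
      1 ≤ L → st + L ≤ text.toList.length → sub ≠ text →
      (text.toList.length - L - st) + (text.toList.length - L) * (text.toList.length + 1) < f →
      allVariantsLoop text f sub ((st : Int) + (L : Int) - 1) L =
        pvRow text st L ++ pvRows text (L + 1) := by
  induction f with
  | zero => intro L st sub _ _ _ hf; omega
  | succ f ih =>
    intro L st sub hL hstL hsub hf
    have hlen : PySem.Str.len text = ((text.toList.length : Nat) : Int) := PySem.Str.len_eq text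
    rw [allVariantsLoop, if_neg hsub]
    have e1 : (st : Int) + (L : Int) - 1 + 1 = (st : Int) + (L : Int) := by ring
    by_cases hend : st + L = text.toList.length
    · have hcond : (st : Int) + (L : Int) - 1 + 1 = PySem.Str.len text := by
        rw [hlen]; omega
      rw [if_pos hcond, e1]
      have e2 : (st : Int) + (L : Int) - (L : Int) = (st : Int) := by ring
      rw [e2]
      have hsl : PySem.Str.slice text (some ((st : Nat) : Int))
          (some (((st : Nat) : Int) + ((L : Nat) : Int))) = pvSl text st L := rfl
      rw [hsl]
      by_cases hLn : L = text.toList.length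
      · have hst : st = 0 := by omega
        subst hst
        have hfull : pvSl text 0 L = text := by rw [hLn]; exact pvSl_full text
        have hz : allVariantsLoop text f (pvSl text 0 L) ((L : Int) + 1 - 1) ((L : Int) + 1) =
            [] := by rw [hfull]; exact loop_text text f _ _
        rw [hz]
        have c1 : text.toList.length + 1 - L - 0 = 1 := by omega
        have c2 : text.toList.length + 1 - (L + 1) = 0 := by omega
        simp only [pvRow, pvRows, c1, c2]
        simp
      · have hLlt : L < text.toList.length := by omega
        have hneq : pvSl text st L ≠ text := by
          intro h
          have hl := pvSl_length text st L (by omega)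
          rw [h] at hl; omega
        have harg2 : (L : Int) + 1 = ((L + 1 : Nat) : Int) := by push_cast; ring
        have harg1 : (L : Int) + 1 - 1 = ((0 : Nat) : Int) + ((L + 1 : Nat) : Int) - 1 := by
          push_cast; ring
        rw [harg1, harg2]
        have hfuel : (text.toList.length - (L + 1) - 0) +
            (text.toList.length - (L + 1)) * (text.toList.length + 1) < f := by
          have hm : text.toList.length - L = (text.toList.length - L - 1) + 1 := by omega
          have h2 : (text.toList.length - L) * (text.toList.length + 1) =
              (text.toList.length - L - 1) * (text.toList.length + 1) +
                (text.toList.length + 1) := by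
            conv_lhs => rw [hm]
            rw [Nat.add_mul, Nat.one_mul]
          have h1 : text.toList.length - (L + 1) = text.toList.length - L - 1 := by omega
          rw [h2] at hf
          rw [h1]
          generalize (text.toList.length - L - 1) * (text.toList.length + 1) = P at hf ⊢
          omega
        rw [ih (L + 1) 0 (pvSl text st L) (by omega) (by omega) hneq hfuel]
        have c1 : text.toList.length + 1 - L - st = 1 := by omega
        have c2 : text.toList.length + 1 - (L + 1) = (text.toList.length + 1 - (L + 1 + 1)) + 1 := by
          omega
        simp only [pvRow, pvRows, c1, c2, List.range'_succ, List.flatMap_cons,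
          List.range'_zero, List.map_cons, List.map_nil, List.cons_append, List.nil_append]
    · have hcond : ¬ ((st : Int) + (L : Int) - 1 + 1 = PySem.Str.len text) := by
        rw [hlen]; omega
      rw [if_neg hcond, e1]
      have e2 : (st : Int) + (L : Int) - (L : Int) = (st : Int) := by ring
      rw [e2]
      have hsl : PySem.Str.slice text (some ((st : Nat) : Int))
          (some (((st : Nat) : Int) + ((L : Nat) : Int))) = pvSl text st L := rfl
      rw [hsl]
      have hneq : pvSl text st L ≠ text := by
        intro h
        have hl := pvSl_length text st L (by omega)
        rw [h] at hl; omega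
      have harg : (st : Int) + (L : Int) = ((st + 1 : Nat) : Int) + ((L : Nat) : Int) - 1 := by
        push_cast; ring
      rw [harg]
      have hfuel : (text.toList.length - L - (st + 1)) +
          (text.toList.length - L) * (text.toList.length + 1) < f := by
        generalize (text.toList.length - L) * (text.toList.length + 1) = P at hf ⊢
        omega
      rw [ih L (st + 1) (pvSl text st L) hL (by omega) hneq hfuel]
      have c1 : text.toList.length + 1 - L - st = (text.toList.length + 1 - L - (st + 1)) + 1 := by
        omega
      conv_rhs => rw [pvRow, c1, List.range'_succ]
      simp [pvRow]

-- ===== B-side lemmas =====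

lemma altRounds_nil (text : String) (f : Nat) : altRounds text f [] = [] := by
  cases f <;> simp [altRounds]

-- one round of window growth turns the full length-L row into the full length-(L+1) row
lemma step_row (text : String) (L : Nat) (hLn : L ≤ text.toList.length) :
    ((pvRow text 0 L).zip (text.toList.drop L)).map (fun p => p.1.push p.2) =
      pvRow text 0 (L + 1) := by
  apply List.ext_getElem
  · simp only [pvRow, List.length_map, List.length_zip, List.length_range', List.length_drop,
      Nat.sub_zero]
    omega
  · intro i h1 h2
    simp only [pvRow, List.length_map, List.length_zip, List.length_range', List.length_drop,
      Nat.sub_zero] at h1 h2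
    have hi : i < text.toList.length - L := by omega
    simp only [pvRow, List.getElem_map, List.getElem_zip, List.getElem_drop,
      List.getElem_range']
    apply String.toList_inj.mp
    rw [String.toList_push]
    simp only [pvSl_toList]
    have e : 0 + 1 * i = i := by omega
    rw [e, List.take_add_one]
    congr 1
    have hd : (text.toList.drop i)[L]? = some text.toList[i + L] := by
      rw [List.getElem?_drop, List.getElem?_eq_getElem (by omega)]
    rw [hd, Option.toList_some]
    simp [Nat.add_comm]

-- the initial one-character windows are exactly the length-1 row
lemma init_row (text : String) :
    text.toList.map (fun c => String.singleton c) = pvRow text 0 1 := by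
  apply List.ext_getElem
  · simp only [pvRow, List.length_map, List.length_range', Nat.sub_zero]
    omega
  · intro i h1 h2
    have hi : i < text.toList.length := by simpa using h1
    simp only [List.getElem_map, pvRow, List.getElem_range']
    apply String.toList_inj.mp
    rw [pvSl_toList, String.toList_singleton]
    have e : 0 + 1 * i = i := by omega
    rw [e, List.drop_eq_getElem_cons hi]
    rfl

lemma alt_eq (text : String) :
    ∀ (f L : Nat), 1 ≤ L → text.toList.length + 2 - L ≤ f →
      altRounds text f (pvRow text 0 L) = pvRows text L := by
  intro f
  induction f with
  | zero =>
    intro L hL hf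
    by_cases hLn : L ≤ text.toList.length
    · omega
    · have c : text.toList.length + 1 - L = 0 := by omega
      simp only [pvRow, pvRows, Nat.sub_zero, c, List.range'_zero, List.map_nil,
        List.flatMap_nil, altRounds_nil]
  | succ f ih =>
    intro L hL hf
    by_cases hLn : L ≤ text.toList.length
    · have hfL : text.toList.length + 2 - (L + 1) ≤ f := by omega
      have c : text.toList.length + 1 - L - 0 = (text.toList.length - L) + 1 := by omega
      have hrow : pvRow text 0 L =
          pvSl text 0 L :: (List.range' 1 (text.toList.length - L)).map (fun s => pvSl text s L) := by
        rw [pvRow, c, List.range'_succ]; rfl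
      rw [hrow, altRounds]
      have hw : PySem.Str.len (pvSl text 0 L) = ((L : Nat) : Int) := by
        rw [PySem.Str.len_eq, pvSl_length text 0 L (by omega)]
      have hslice : (PySem.Str.slice text (some ((L : Nat) : Int)) none).toList =
          text.toList.drop L := by
        simp [PySem.Str.toList_slice, PySem.Chars.slice_eq_listSlice,
          PySem.List.slice_from_natCast]
      have ihL : altRounds text f (pvRow text 0 (L + 1)) = pvRows text (L + 1) :=
        ih (L + 1) (by omega) hfL
      rw [hw, hslice, ← hrow]
      rw [step_row text L hLn, ihL]
      have c2 : text.toList.length + 1 - L = (text.toList.length - L) + 1 := by omega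
      conv_rhs => rw [pvRows, c2, List.range'_succ, List.flatMap_cons]
      have c3 : text.toList.length + 1 - (L + 1) = text.toList.length - L := by omega
      rw [pvRows, c3]
    · have c : text.toList.length + 1 - L = 0 := by omega
      simp only [pvRow, pvRows, Nat.sub_zero, c, List.range'_zero, List.map_nil,
        List.flatMap_nil, altRounds_nil]

-- ===== VERDICT proof =====
theorem all_variants_spec : Claim_equal_all_variants := by
  intro text _
  unfold Spec_all_variants
  have hlen : PySem.Str.len text = ((text.toList.length : Nat) : Int) := PySem.Str.len_eq text
  rcases Nat.eq_zero_or_pos text.toList.length with h0 | h1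
  · have ht : text = "" := String.toList_eq_nil_iff.mp (List.length_eq_zero_iff.mp h0)
    subst ht; rfl
  · unfold all_variants all_variants_alt
    rw [hlen]
    simp only [Int.toNat_natCast]
    -- A side
    have hsub : ("" : String) ≠ text := by
      intro h
      rw [← h] at h1; simp at h1
    have hfuel : ∀ n : Nat, 1 ≤ n → (n - 1 - 0) + (n - 1) * (n + 1) < n * (n + 3) + 1 := by
      intro n hn
      obtain ⟨m, rfl⟩ : ∃ m, n = m + 1 := ⟨n - 1, by omega⟩
      simp only [Nat.add_sub_cancel, Nat.sub_zero]
      nlinarith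
    have key := loop_eq text (text.toList.length * (text.toList.length + 3) + 1) 1 0 ""
      (le_refl 1) (by omega) hsub (hfuel _ h1)
    simp only [Nat.cast_zero, Nat.cast_one, zero_add, sub_self] at key
    rw [key]
    -- B side
    rw [init_row, alt_eq text (text.toList.length + 1) 1 (le_refl 1) (by omega)]
    have c1 : text.toList.length + 1 - 1 = (text.toList.length - 1) + 1 := by omega
    conv_rhs => rw [pvRows, c1, List.range'_succ, List.flatMap_cons]
    have c2 : text.toList.length + 1 - 2 = text.toList.length - 1 := by omega
    rw [pvRows, c2]
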